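-- pv_equiv track=rewrite | github.com/MacGyver1618/advent-of-code | 2024/python/advent_04.py | has_mas
-- ===== SOURCE A (Python) =====
-- mass = [["M.S",".A.","M.S"],["M.M",".A.","S.S"],["S.M",".A.","S.M"],["S.S",".A.","M.M"]]
--
-- def has_mas(subgrid):
--     for mas in mass:
--         matches=True
--         for r,line in enumerate(mas):
--             for c,sym in enumerate(line):
--                 if sym==".":
--                     continue
--                 matches &= sym == subgrid[r][c]
--         if matches:
--             return True
--     return False
-- ===== SOURCE B (Python) =====
-- def has_mas(subgrid):
--     d1 = subgrid[0][0] + subgrid[1][1] + subgrid[2][2]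
--     d2 = subgrid[0][2] + subgrid[1][1] + subgrid[2][0]
--     ok = ("MAS", "SAM")
--     return d1 in ok and d2 in ok
-- ===== Notes on version B (the rewrite author's own statement) =====
-- stated objective: simpler
-- what changed: Replaced the scan over four 3x3 wildcard templates with direct extraction of the two diagonals and a membership test against {'MAS','SAM'}.
import Mathlib
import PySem

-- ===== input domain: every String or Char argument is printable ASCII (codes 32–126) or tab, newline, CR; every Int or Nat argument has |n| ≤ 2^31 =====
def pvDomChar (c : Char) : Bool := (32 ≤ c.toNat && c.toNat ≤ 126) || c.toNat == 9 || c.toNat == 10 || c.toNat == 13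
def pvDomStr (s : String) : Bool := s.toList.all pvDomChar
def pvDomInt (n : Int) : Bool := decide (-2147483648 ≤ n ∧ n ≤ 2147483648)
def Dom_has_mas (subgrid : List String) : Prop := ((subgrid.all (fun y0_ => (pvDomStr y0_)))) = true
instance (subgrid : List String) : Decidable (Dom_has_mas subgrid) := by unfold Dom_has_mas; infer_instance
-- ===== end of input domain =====

-- B replaces A's scan over four 3x3 wildcard templates by extracting the two diagonals
-- and testing membership in {"MAS","SAM"}; same return value on all of Pre_.

-- ===== PORT A =====
-- the module constant `mass`
def pvMass : List (List String) :=
  [["M.S", ".A.", "M.S"], ["M.M", ".A.", "S.S"], ["S.M", ".A.", "S.M"], ["S.S", ".A.", "M.M"]]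

-- subgrid[r][c]; none exactly where Python raises IndexError
def pvCellA (subgrid : List String) (r c : Int) : Option Char :=
  (PySem.List.pyGet? subgrid r).bind fun s => PySem.Str.pyGet? s c

-- inner loop: `for c,sym in enumerate(line): if sym=='.': continue; matches &= sym == subgrid[r][c]`
def pvLineA (subgrid : List String) (r : Int) (line : String) (m0 : Bool) : Bool :=
  (PySem.List.enumerate line.toList).foldl
    (fun m p => if p.2 = '.' then m else m && (some p.2 == pvCellA subgrid r p.1)) m0

-- middle loop: `for r,line in enumerate(mas)` with initial matches=True
def pvTemplA (subgrid : List String) (mas : List String) : Bool :=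
  (PySem.List.enumerate mas).foldl (fun m p => pvLineA subgrid p.1 p.2 m) true

-- outer loop: `for mas in mass: … if matches: return True` / final `return False`
def pvGoA (subgrid : List String) : List (List String) → Bool
  | [] => false
  | mas :: rest => if pvTemplA subgrid mas then true else pvGoA subgrid rest

def has_mas (subgrid : List String) : Bool := pvGoA subgrid pvMass

-- ===== PORT B =====
-- subgrid[r][c]; none exactly where Python raises IndexError
def pvCellB (subgrid : List String) (r c : Int) : Option Char :=
  (PySem.List.pyGet? subgrid r).bind fun s => PySem.Str.pyGet? s c

def has_mas_alt (subgrid : List String) : Bool :=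
  match pvCellB subgrid 0 0, pvCellB subgrid 1 1, pvCellB subgrid 2 2,
        pvCellB subgrid 0 2, pvCellB subgrid 2 0 with
  | some a, some b, some c, some d, some e =>
      -- d1, d2 built as code-point lists; `in {"MAS","SAM"}` is exact equality of the 3 chars
      let d1 : List Char := [a, b, c]
      let d2 : List Char := [d, b, e]
      (d1 == ['M', 'A', 'S'] || d1 == ['S', 'A', 'M']) && (d2 == ['M', 'A', 'S'] || d2 == ['S', 'A', 'M'])
  | _, _, _, _, _ => false   -- unreachable inside Pre_ (Python raises IndexError there)

-- ===== PRECONDITION & SPEC =====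
-- Pre_ excludes exactly the inputs where Python A raises IndexError: both programs read
-- cells (0,0),(0,2),(1,1),(2,0),(2,2), so rows 0 and 2 need ≥ 3 chars, row 1 needs ≥ 2.
def Pre_has_mas (subgrid : List String) : Prop :=
  3 ≤ subgrid.length ∧
  3 ≤ (subgrid.getD 0 "").toList.length ∧
  2 ≤ (subgrid.getD 1 "").toList.length ∧
  3 ≤ (subgrid.getD 2 "").toList.length
instance (subgrid : List String) : Decidable (Pre_has_mas subgrid) := by
  unfold Pre_has_mas; infer_instance

def pvWitness_has_mas : List String := ["MXS", "YAZ", "SQM"]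

def Spec_has_mas (subgrid : List String) (out : Bool) : Prop := out = has_mas_alt subgrid
instance (subgrid : List String) (out : Bool) : Decidable (Spec_has_mas subgrid out) := by
  unfold Spec_has_mas; infer_instance

-- ===== CLAIM (what is proved, stated in full; the proofs are below) =====
def Claim_equal_has_mas : Prop := ∀ (subgrid : List String), Dom_has_mas subgrid → Pre_has_mas subgrid → Spec_has_mas subgrid (has_mas subgrid)

-- ===== LEMMAS AND PROOFS =====

theorem pvG1 {α : Type} (u v : α) (t : List α) : PySem.List.pyGet? (u :: v :: t) 1 = some v := by
  simp only [PySem.List.pyGet?, PySem.List.pyIdx?]; norm_num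

theorem pvG2 {α : Type} (u v w : α) (t : List α) : PySem.List.pyGet? (u :: v :: w :: t) 2 = some w := by
  simp only [PySem.List.pyGet?, PySem.List.pyIdx?]
  norm_num
  rw [if_pos (by omega)]
  rfl

theorem pvLen3 {α : Type} (l : List α) (h : 3 ≤ l.length) :
    ∃ u v w t, l = u :: v :: w :: t := by
  match l with
  | u :: v :: w :: t => exact ⟨u, v, w, t, rfl⟩
  | [] | [_] | [_, _] => simp at h

theorem pvLen2 {α : Type} (l : List α) (h : 2 ≤ l.length) :
    ∃ u v t, l = u :: v :: t := by
  match l with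
  | u :: v :: t => exact ⟨u, v, t, rfl⟩
  | [] | [_] => simp at h

-- ===== VERDICT =====
theorem has_mas_spec : Claim_equal_has_mas := by
  intro subgrid _ hPre
  obtain ⟨h0, h1, h2, h3⟩ := hPre
  obtain ⟨s0, s1, s2, rest, rfl⟩ := pvLen3 subgrid h0
  simp only [List.getD, List.getElem?_cons_zero, List.getElem?_cons_succ, Option.getD_some] at h1 h2 h3
  obtain ⟨a, x, d, t0, hl0⟩ := pvLen3 s0.toList h1
  obtain ⟨y, b, t1, hl1⟩ := pvLen2 s1.toList h2
  obtain ⟨e, z, c, t2, hl2⟩ := pvLen3 s2.toList h3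
  show has_mas _ = has_mas_alt _
  simp [has_mas, has_mas_alt, pvMass, pvGoA, pvTemplA, pvLineA, pvCellA, pvCellB,
    PySem.List.enumerate_cons, PySem.List.enumerate_nil,
    List.foldl,
    PySem.Str.pyGet?, PySem.Chars.pyGet?_eq_listPyGet?,
    pvG1, pvG2, Option.bind_some,
    hl0, hl1, hl2]
  simp only [Bool.beq_eq_decide_eq, eq_comm (b := a), eq_comm (b := b), eq_comm (b := c),
    eq_comm (b := d), eq_comm (b := e)]
  generalize decide (a = 'M') = pAM
  generalize decide (a = 'S') = pAS
  generalize decide (b = 'A') = pBA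
  generalize decide (c = 'S') = pCS
  generalize decide (c = 'M') = pCM
  generalize decide (d = 'M') = pDM
  generalize decide (d = 'S') = pDS
  generalize decide (e = 'S') = pES
  generalize decide (e = 'M') = pEM
  revert pAM pAS pBA pCS pCM pDM pDS pES pEM
  decide
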